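-- pv_equiv track=rewrite | github.com/MeetWq/anime_renamer | functions.py | get_prefix_idx
-- ===== SOURCE A (Python) =====
-- def get_repeat_idx(str1, str2):
--     idx = 0
--     for i in range(min(len(str1), len(str2))):
--         if str1[i] != str2[i]:
--             break
--         idx += 1
--     return idx
--
-- def get_prefix_idx(name_list):
--     if len(name_list) <= 1:
--         return 0
--     idx = []
--     for i in range(len(name_list) - 1):
--         idx.append(get_repeat_idx(name_list[i], name_list[i + 1]))
--     min_idx = min(idx)
--     return min_idx
-- ===== SOURCE B (Python) =====
-- def get_prefix_idx(name_list):
--     if len(name_list) <= 1: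
--         return 0
--     first = name_list[0]
--     limit = min(len(s) for s in name_list)
--     i = 0
--     while i < limit and all(s[i] == first[i] for s in name_list):
--         i += 1
--     return i
-- ===== Notes on version B (the rewrite author's own statement) =====
-- stated objective: simpler
-- what changed: Replaces the n-1 pairwise common-prefix scans plus a final min() with a single column-wise sweep that compares every string against the first, stopping at the first disagreeing column (valid since the min adjacent-pair common prefix equals the whole-list common prefix); it avoids re-scanning shared prefix columns pair by pair.
import Mathlib
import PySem

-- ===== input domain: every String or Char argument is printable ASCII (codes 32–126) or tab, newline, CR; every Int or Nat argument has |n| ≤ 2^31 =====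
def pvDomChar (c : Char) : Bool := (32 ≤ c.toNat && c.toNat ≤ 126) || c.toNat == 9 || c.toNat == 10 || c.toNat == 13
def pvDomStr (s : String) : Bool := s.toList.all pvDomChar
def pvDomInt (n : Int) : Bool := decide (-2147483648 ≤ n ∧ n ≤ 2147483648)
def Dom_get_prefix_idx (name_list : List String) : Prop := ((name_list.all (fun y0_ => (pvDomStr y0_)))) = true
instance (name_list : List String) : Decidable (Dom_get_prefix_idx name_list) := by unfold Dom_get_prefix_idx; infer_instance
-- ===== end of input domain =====

-- B replaces A's n-1 pairwise common-prefix scans + min() with one column-wise sweep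
-- against the first string (objective: simpler).

-- ===== PORT A =====
-- get_repeat_idx: the 'for i in range(min(len,len))' loop with break, walking both
-- strings in lockstep with the running idx accumulator (break on first mismatch).
def lcpGo : List Char → List Char → Nat → Nat
  | a :: as, b :: bs, idx => if a ≠ b then idx else lcpGo as bs (idx + 1)
  | _, _, idx => idx

def get_repeat_idx_port (str1 str2 : String) : Nat :=
  lcpGo str1.toList str2.toList 0

def get_prefix_idx (name_list : List String) : Int :=
  if name_list.length ≤ 1 then 0
  else
    -- the append loop over range(len(name_list)-1); name_list[i] is in range, so getD is exact
    let idx := (List.range (name_list.length - 1)).foldl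
      (fun acc i => acc ++ [get_repeat_idx_port (name_list.getD i "") (name_list.getD (i + 1) "")]) []
    -- min(idx); idx is nonempty here (length ≥ 2), so the .getD 0 default is unreachable
    ((PySem.List.min? idx (fun x => x)).getD 0 : Nat)

-- ===== PORT B =====
-- the 'while i < limit and all(...)' loop; i < limit ≤ len s, so the optional lookup is exact
def altLoop (names : List String) (first : String) (limit : Nat) (i : Nat) : Nat :=
  if _h : i < limit then
    if names.all (fun s => s.toList[i]? == first.toList[i]?) then
      altLoop names first limit (i + 1)
    else i
  else i
termination_by limit - i

def get_prefix_idx_alt (name_list : List String) : Int :=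
  if name_list.length ≤ 1 then 0
  else
    match name_list with
    | [] => 0  -- unreachable: length ≥ 2
    | first :: rest =>
      -- limit = min(len(s) for s in name_list)
      let limit := rest.foldl (fun m s => min m s.toList.length) first.toList.length
      (altLoop name_list first limit 0 : Nat)

-- ===== PRECONDITION & SPEC =====
def Spec_get_prefix_idx (name_list : List String) (out : Int) : Prop := out = get_prefix_idx_alt name_list
instance (name_list : List String) (out : Int) : Decidable (Spec_get_prefix_idx name_list out) := by unfold Spec_get_prefix_idx; infer_instance

-- ===== CLAIM (what is proved, stated in full; the proofs are below) =====
def Claim_equal_get_prefix_idx : Prop := ∀ (name_list : List String), Dom_get_prefix_idx name_list → Spec_get_prefix_idx name_list (get_prefix_idx name_list)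

-- ===== LEMMAS AND PROOFS =====

def adjPairs {α : Type} : List α → List (α × α)
  | x :: y :: r => (x, y) :: adjPairs (y :: r)
  | _ => []

-- the accumulator only shifts the result
theorem lcpGo_acc : ∀ (a b : List Char) (n : Nat), lcpGo a b n = n + lcpGo a b 0 := by
  intro a
  induction a with
  | nil => intro b n; cases b <;> simp [lcpGo]
  | cons c cs ihc =>
    intro b n
    cases b with
    | nil => simp [lcpGo]
    | cons d ds =>
      by_cases hcd : c = d
      · simp only [lcpGo, hcd, ne_eq, not_true_eq_false, if_false]
        rw [ihc ds (n + 1), ihc ds 1]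
        omega
      · simp [lcpGo, hcd]

-- characterization of the pairwise loop as "agreement through position j"
theorem lcpGo_lt_iff (a b : List Char) (j : Nat) :
    (j < lcpGo a b 0 ↔ (j < a.length ∧ j < b.length ∧ ∀ i ≤ j, a[i]? = b[i]?)) := by
  induction a generalizing b j with
  | nil => simp [lcpGo]
  | cons x as ih =>
    cases b with
    | nil => simp [lcpGo]
    | cons y bs =>
      by_cases hxy : x = y
      · subst hxy
        have hstep : lcpGo (x :: as) (x :: bs) 0 = 1 + lcpGo as bs 0 := by
          simp only [lcpGo, ne_eq, not_true_eq_false, if_false]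
          exact lcpGo_acc as bs 1
        rw [hstep]
        cases j with
        | zero =>
          constructor
          · intro _
            refine ⟨by simp, by simp, ?_⟩
            intro i hi
            interval_cases i
            rfl
          · intro _
            omega
        | succ j =>
          constructor
          · intro h
            have h' := (ih bs j).mp (by omega)
            refine ⟨by simp; omega, by simp; omega, ?_⟩
            intro i hi
            cases i with
            | zero => simp
            | succ i => simpa using h'.2.2 i (by omega)
          · intro ⟨h1, h2, h3⟩
            have h' : j < lcpGo as bs 0 := by
              refine (ih bs j).mpr ⟨by simp at h1; omega, by simp at h2; omega, ?_⟩
              intro i hi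
              have := h3 (i + 1) (by omega)
              simpa using this
            omega
      · constructor
        · intro h; simp [lcpGo, hxy] at h
        · intro ⟨_, _, h3⟩
          exact absurd (by simpa using h3 0 (by omega)) hxy

-- the append loop builds exactly the mapped list
theorem foldl_append_singleton {α β : Type} (f : α → β) (l : List α) :
    ∀ (acc : List β), l.foldl (fun acc i => acc ++ [f i]) acc = acc ++ l.map f := by
  induction l with
  | nil => intro acc; simp
  | cons x t ih => intro acc; simp [List.foldl_cons, ih]

-- the indexed adjacent-pair map equals the structural one
theorem range_map_adjPairs {α β : Type} (d : α) (f : α → α → β) :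
    ∀ (l : List α),
      (List.range (l.length - 1)).map (fun i => f (l.getD i d) (l.getD (i + 1) d))
        = (adjPairs l).map (fun p => f p.1 p.2) := by
  intro l
  match l with
  | [] => simp [adjPairs]
  | [x] => simp [adjPairs]
  | x :: y :: r =>
    have ih := range_map_adjPairs d f (y :: r)
    have hlen : (x :: y :: r).length - 1 = ((y :: r).length - 1) + 1 := by simp
    rw [hlen, List.range_succ_eq_map, adjPairs]
    simp only [List.map_cons, List.map_map]
    rw [← ih]
    simp [Function.comp]

-- j is below a running minimum iff it is below every element
theorem foldl_min_lt_iff {β : Type} (key : β → Nat) :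
    ∀ (t : List β) (x j : Nat),
      (j < t.foldl (fun m s => min m (key s)) x ↔ (j < x ∧ ∀ v ∈ t, j < key v)) := by
  intro t
  induction t with
  | nil => simp
  | cons s t ih =>
    intro x j
    simp only [List.foldl_cons, ih, List.mem_cons]
    constructor
    · intro ⟨h1, h2⟩
      refine ⟨by omega, ?_⟩
      intro v hv
      rcases hv with h | h
      · subst h; omega
      · exact h2 v h
    · intro ⟨h1, h2⟩
      exact ⟨by have := h2 s (Or.inl rfl); omega, fun v hv => h2 v (Or.inr hv)⟩

-- the adjacent-pair chain agrees through j iff every string agrees with the first through j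
theorem chain_iff :
    ∀ (r : List String) (x y : String) (j : Nat),
      ((∀ p ∈ adjPairs (x :: y :: r), j < lcpGo p.1.toList p.2.toList 0) ↔
        (j < x.toList.length ∧
          ∀ s ∈ y :: r, j < s.toList.length ∧ ∀ i ≤ j, s.toList[i]? = x.toList[i]?)) := by
  intro r
  induction r with
  | nil =>
    intro x y j
    simp only [adjPairs, List.mem_cons, List.not_mem_nil, or_false, forall_eq]
    rw [lcpGo_lt_iff]
    constructor
    · intro ⟨h1, h2, h3⟩
      exact ⟨h1, h2, fun i hi => (h3 i hi).symm⟩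
    · intro ⟨h1, h2, h3⟩
      exact ⟨h1, h2, fun i hi => (h3 i hi).symm⟩
  | cons z r ih =>
    intro x y j
    have hsplit : (∀ p ∈ adjPairs (x :: y :: z :: r), j < lcpGo p.1.toList p.2.toList 0) ↔
        (j < lcpGo x.toList y.toList 0 ∧
          ∀ p ∈ adjPairs (y :: z :: r), j < lcpGo p.1.toList p.2.toList 0) := by
      rw [show adjPairs (x :: y :: z :: r) = (x, y) :: adjPairs (y :: z :: r) from rfl]
      simp
    rw [hsplit, ih y z j, lcpGo_lt_iff]
    constructor
    · intro ⟨⟨hx, hy, hxy⟩, _hy', hrest⟩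
      refine ⟨hx, ?_⟩
      intro s hs
      rcases List.mem_cons.mp hs with h | hmem
      · subst h
        exact ⟨hy, fun i hi => (hxy i hi).symm⟩
      · obtain ⟨hslen, hsagree⟩ := hrest s hmem
        exact ⟨hslen, fun i hi => (hsagree i hi).trans ((hxy i hi).symm)⟩
    · intro ⟨hx, hall⟩
      obtain ⟨hy, hyagree⟩ := hall y (by simp)
      refine ⟨⟨hx, hy, fun i hi => (hyagree i hi).symm⟩, hy, ?_⟩
      intro s hmem
      obtain ⟨hslen, hsagree⟩ := hall s (by simp [hmem])
      exact ⟨hslen, fun i hi => (hsagree i hi).trans ((hyagree i hi).symm)⟩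

-- the while-loop computes the least index where its condition fails
theorem altLoop_eq_find (names : List String) (first : String) (limit : Nat)
    (H : ∃ i, ¬ (i < limit ∧ names.all (fun s => s.toList[i]? == first.toList[i]?) = true)) :
    ∀ (k i0 : Nat), limit - i0 ≤ k → i0 ≤ Nat.find H →
      (∀ i < i0, i < limit ∧ names.all (fun s => s.toList[i]? == first.toList[i]?) = true) →
      altLoop names first limit i0 = Nat.find H := by
  intro k
  induction k with
  | zero =>
    intro i0 hk hle _hinv
    have hnot : ¬ (i0 < limit ∧ names.all (fun s => s.toList[i0]? == first.toList[i0]?) = true) := by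
      intro h; omega
    have : Nat.find H ≤ i0 := Nat.find_le hnot
    have hi0 : i0 = Nat.find H := by omega
    rw [altLoop]
    simp only [show ¬ i0 < limit by omega, dif_neg, not_false_iff]
    simpa using hi0
  | succ k ih =>
    intro i0 hk hle hinv
    rw [altLoop]
    by_cases hlt : i0 < limit
    · simp only [dif_pos hlt]
      by_cases hall : names.all (fun s => s.toList[i0]? == first.toList[i0]?) = true
      · simp only [if_pos hall]
        have hne : i0 ≠ Nat.find H := by
          intro h
          exact (Nat.find_spec H) (h ▸ ⟨hlt, hall⟩)
        refine ih (i0 + 1) (by omega) (by omega) ?_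
        intro i hi
        by_cases h : i < i0
        · exact hinv i h
        · have : i = i0 := by omega
          subst this; exact ⟨hlt, hall⟩
      · simp only [if_neg hall]
        have hnot : ¬ (i0 < limit ∧ names.all (fun s => s.toList[i0]? == first.toList[i0]?) = true) := by
          intro h; exact hall h.2
        have : Nat.find H ≤ i0 := Nat.find_le hnot
        omega
    · simp only [dif_neg hlt]
      have hnot : ¬ (i0 < limit ∧ names.all (fun s => s.toList[i0]? == first.toList[i0]?) = true) := by
        intro h; exact hlt h.1
      have : Nat.find H ≤ i0 := Nat.find_le hnot
      omega


-- A's running minimum is below j iff every adjacent-pair lcp is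
theorem aside_iff (x y : String) (r : List String) (j : Nat) :
    (j < ((adjPairs (y :: r)).map (fun p => get_repeat_idx_port p.1 p.2)).foldl min
        (get_repeat_idx_port x y) ↔
      ∀ p ∈ adjPairs (x :: y :: r), j < lcpGo p.1.toList p.2.toList 0) := by
  have h := foldl_min_lt_iff (fun v : Nat => v)
    ((adjPairs (y :: r)).map (fun p => get_repeat_idx_port p.1 p.2)) (get_repeat_idx_port x y) j
  simp only [List.mem_map, forall_exists_index, and_imp, forall_apply_eq_imp_iff₂] at h
  rw [show ((adjPairs (y :: r)).map (fun p => get_repeat_idx_port p.1 p.2)).foldl min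
      (get_repeat_idx_port x y)
    = ((adjPairs (y :: r)).map (fun p => get_repeat_idx_port p.1 p.2)).foldl
      (fun m s => min m s) (get_repeat_idx_port x y) from rfl]
  rw [h]
  rw [show adjPairs (x :: y :: r) = (x, y) :: adjPairs (y :: r) from rfl]
  simp only [List.mem_cons, forall_eq_or_imp]
  unfold get_repeat_idx_port
  tauto

-- B's loop condition at i, unfolded into length bounds and pointwise agreement
theorem bside_cond_iff (x y : String) (r : List String) (i : Nat) :
    ((i < (y :: r).foldl (fun m s => min m s.toList.length) x.toList.length ∧
        (x :: y :: r).all (fun s => s.toList[i]? == x.toList[i]?) = true) ↔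
      (i < x.toList.length ∧ (∀ s ∈ y :: r, i < s.toList.length) ∧
        (∀ s ∈ y :: r, s.toList[i]? = x.toList[i]?))) := by
  rw [foldl_min_lt_iff (fun s : String => s.toList.length)]
  simp only [List.all_eq_true, beq_iff_eq, List.mem_cons, forall_eq_or_imp]
  tauto

-- ===== VERDICT (by name: the statement is the Claim_ definition above) =====
theorem get_prefix_idx_spec : Claim_equal_get_prefix_idx := by
  intro name_list _hdom
  unfold Spec_get_prefix_idx get_prefix_idx get_prefix_idx_alt
  rcases name_list with _ | ⟨x, _ | ⟨y, r⟩⟩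
  · simp
  · simp
  · have hlen : ¬ ((x :: y :: r).length ≤ 1) := by simp
    simp only [if_neg hlen]
    -- A's value as a Nat
    rw [foldl_append_singleton
      (fun i => get_repeat_idx_port ((x :: y :: r).getD i "") ((x :: y :: r).getD (i + 1) "")),
      List.nil_append, range_map_adjPairs,
      show adjPairs (x :: y :: r) = (x, y) :: adjPairs (y :: r) from rfl,
      List.map_cons, PySem.List.min?_id_cons, Option.getD_some]
    -- B's value: the loop computes the least index where its condition fails
    set limit := (y :: r).foldl (fun m s => min m s.toList.length) x.toList.length with hlimit
    have H : ∃ i, ¬ (i < limit ∧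
        (x :: y :: r).all (fun s => s.toList[i]? == x.toList[i]?) = true) :=
      ⟨limit, by intro h; omega⟩
    have hB := altLoop_eq_find (x :: y :: r) x limit H limit 0 (by omega) (by omega)
      (by intro i hi; omega)
    rw [hB]
    -- both Nat values are below the same j's, hence equal
    have hiff : ∀ j : Nat,
        (j < ((adjPairs (y :: r)).map (fun p => get_repeat_idx_port p.1 p.2)).foldl min
            (get_repeat_idx_port x y) ↔ j < Nat.find H) := by
      intro j
      rw [aside_iff, chain_iff, Nat.lt_find_iff]
      constructor
      · intro ⟨hx, hall⟩ i hi
        rw [not_not]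
        refine (bside_cond_iff x y r i).mpr ⟨by omega, ?_, ?_⟩
        · intro s hs; have := (hall s hs).1; omega
        · intro s hs; exact (hall s hs).2 i hi
      · intro h
        have h' : ∀ i ≤ j, (i < x.toList.length ∧ (∀ s ∈ y :: r, i < s.toList.length) ∧
            (∀ s ∈ y :: r, s.toList[i]? = x.toList[i]?)) := by
          intro i hi
          exact (bside_cond_iff x y r i).mp (not_not.mp (h i hi))
        refine ⟨(h' j (le_refl j)).1, ?_⟩
        intro s hs
        exact ⟨(h' j (le_refl j)).2.1 s hs, fun i hi => (h' i hi).2.2 s hs⟩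
    have heq : ((adjPairs (y :: r)).map (fun p => get_repeat_idx_port p.1 p.2)).foldl min
        (get_repeat_idx_port x y) = Nat.find H := by
      by_contra hne
      rcases Nat.lt_or_ge (((adjPairs (y :: r)).map (fun p => get_repeat_idx_port p.1 p.2)).foldl min
          (get_repeat_idx_port x y)) (Nat.find H) with h | h
      · exact absurd ((hiff _).mpr h) (lt_irrefl _)
      · have : Nat.find H < _ := Nat.lt_of_le_of_ne h (by omega)
        exact absurd ((hiff _).mp this) (lt_irrefl _)
    rw [heq]
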